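-- pv_equiv track=rewrite | github.com/cirosantilli/project-euler-solvers | solvers/300.py | _sum_bitsets
-- ===== SOURCE A (Python) =====
-- from typing import List
--
-- def _sum_bitsets(bitsets: List[int], bits: int) -> List[int]:
--     """
--     Bit-sliced sum of many {0,1} bitsets.
--
--     Returns slices s[0..bits-1] (LSB to MSB) such that for each position p,
--     the binary number formed by bits of s is equal to the count of input
--     bitsets that had bit p set.
--     """
--     slices = [0] * bits
--     for S in bitsets:
--         carry = S
--         for b in range(bits):
--             new = slices[b] ^ carry
--             carry = slices[b] & carry
--             slices[b] = new
--             if carry == 0: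
--                 break
--     return slices
-- ===== SOURCE B (Python) =====
-- from typing import List
--
-- def _sum_bitsets(bitsets: List[int], bits: int) -> List[int]:
--     """Divide-and-conquer bit-sliced sum: split, recurse, ripple-carry add the two
--     halves' slice vectors.  A segment of m bitsets can only produce counts up to m,
--     so only min(bits, m.bit_length()) slices are kept; zeros pad the top at the end."""
--     width = bits if bits > 0 else 0
--
--     def rec(lo: int, hi: int) -> List[int]:
--         # slices (LSB first) of the per-position counts over bitsets[lo:hi],
--         # truncated to t = min(width, (hi - lo).bit_length()) slices
--         if hi - lo == 1:
--             return [bitsets[lo]] if width else []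
--         mid = (lo + hi) // 2
--         left = rec(lo, mid)
--         right = rec(mid, hi)
--         t = min(width, (hi - lo).bit_length())
--         out = []
--         c = 0
--         for i in range(t):
--             a = left[i] if i < len(left) else 0
--             b = right[i] if i < len(right) else 0
--             out.append(a ^ b ^ c)
--             c = (a & b) | (c & (a ^ b))
--         return out
--
--     s = rec(0, len(bitsets)) if bitsets else []
--     return s + [0] * (width - len(s))
-- ===== Notes on version B (the rewrite author's own statement) =====
-- stated objective: alternative
-- what changed: Replaces A's sequential one-bitset-at-a-time ripple accumulation (with early carry break) by a divide-and-conquer tree: recurse on the two halves of the list and merge their slice vectors with a full-adder ripple-carry pass, keeping only min(bits, m.bit_length()) slices for a segment of m bitsets and zero-padding up to bits at the end.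
import Mathlib
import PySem

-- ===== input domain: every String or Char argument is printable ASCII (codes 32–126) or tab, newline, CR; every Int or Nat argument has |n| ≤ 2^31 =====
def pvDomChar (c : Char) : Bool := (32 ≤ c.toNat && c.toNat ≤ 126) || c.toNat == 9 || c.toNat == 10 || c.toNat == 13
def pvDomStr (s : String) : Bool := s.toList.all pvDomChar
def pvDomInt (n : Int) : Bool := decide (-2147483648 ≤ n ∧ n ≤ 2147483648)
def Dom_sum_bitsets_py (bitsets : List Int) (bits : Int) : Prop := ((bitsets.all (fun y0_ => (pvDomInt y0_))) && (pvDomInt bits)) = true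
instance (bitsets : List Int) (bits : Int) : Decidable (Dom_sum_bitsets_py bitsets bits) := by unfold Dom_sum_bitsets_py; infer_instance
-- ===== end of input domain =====

-- B replaces A's one-bitset-at-a-time ripple accumulation by a divide-and-conquer tree of
-- full-adder (ripple-carry) additions of truncated slice vectors (objective: alternative).

-- ===== PORT A =====
-- inner `for b in range(bits)` loop of A: slices has exactly `bits` entries, the loop walks
-- them from the LSB slice, updating slices[b] and the carry, breaking when the carry is 0
def pyAddBit : List Int → Int → List Int
  | [], _ => []
  | s :: rest, carry =>
    let new := PySem.Int.bxor s carry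
    let c := PySem.Int.band s carry
    if c = 0 then new :: rest else new :: pyAddBit rest c

def sum_bitsets_py (bitsets : List Int) (bits : Int) : List Int :=
  bitsets.foldl (fun slices S => pyAddBit slices S) (List.replicate bits.toNat 0)

-- ===== PORT B =====
-- the `for i in range(t)` ripple-carry loop of B: i-th entries of left/right (0 beyond
-- their ends, read here as headD 0 of the walked tails), t entries produced
def rippleAddT : Nat → List Int → List Int → Int → List Int
  | 0, _, _, _ => []
  | t + 1, X, Y, c =>
      let a := X.headD 0
      let b := Y.headD 0
      PySem.Int.bxor (PySem.Int.bxor a b) c ::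
        rippleAddT t X.tail Y.tail
          (PySem.Int.bor (PySem.Int.band a b) (PySem.Int.band c (PySem.Int.bxor a b)))

-- B's `rec` on the segment bitsets[lo:hi] (passed as the sublist; never called on [])
def dncSum : List Int → Nat → List Int
  | [], _ => []
  | [S], w => match w with | 0 => [] | _ + 1 => [S]
  | x :: y :: rest, w =>
      let l := x :: y :: rest
      let k := l.length / 2
      rippleAddT (min w (PySem.Int.bitLength (l.length : Int)))
        (dncSum (l.take k) w) (dncSum (l.drop k) w) 0
termination_by l _ => l.length
decreasing_by
  · simp [List.length_take]; omega
  · simp; omega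

def sum_bitsets_py_alt (bitsets : List Int) (bits : Int) : List Int :=
  let width := bits.toNat
  let s := if bitsets = [] then [] else dncSum bitsets width
  s ++ List.replicate (width - s.length) 0

-- ===== PRECONDITION & SPEC =====
def Spec_sum_bitsets_py (bitsets : List Int) (bits : Int) (out : List Int) : Prop := out = sum_bitsets_py_alt bitsets bits
instance (bitsets : List Int) (bits : Int) (out : List Int) : Decidable (Spec_sum_bitsets_py bitsets bits out) := by unfold Spec_sum_bitsets_py; infer_instance

-- ===== CLAIM (what is proved, stated in full; the proofs are below) =====
def Claim_equal_sum_bitsets_py : Prop := ∀ (bitsets : List Int) (bits : Int), Dom_sum_bitsets_py bitsets bits → Spec_sum_bitsets_py bitsets bits (sum_bitsets_py bitsets bits)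

-- ===== LEMMAS AND PROOFS =====

-- bridge: PySem's Python-exact bitwise ops are Mathlib's Int.land / Int.lor / Int.xor
theorem nat_ldiff_add_land (m n : ℕ) : m.ldiff n + (m &&& n) = m := by
  induction m using Nat.binaryRec generalizing n with
  | zero =>
    have h0 : Nat.ldiff 0 n = 0 := by
      apply Nat.eq_of_testBit_eq; intro i; simp [Nat.testBit_ldiff]
    simp [h0]
  | bit b m ih =>
    rw [show n = Nat.bit (n.testBit 0) (n >>> 1) from (Nat.bit_testBit_zero_shiftRight_one n).symm]
    rw [Nat.ldiff_bit, Nat.land_bit, Nat.bit_val, Nat.bit_val, Nat.bit_val]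
    have := ih (n >>> 1)
    cases b <;> cases n.testBit 0 <;> simp [Bool.toNat] <;> omega

theorem nat_sub_land (m n : ℕ) : m - (m &&& n) = m.ldiff n := by
  have := nat_ldiff_add_land m n; omega

theorem negSucc_not_nonneg (n : ℕ) : ¬ (0 : Int) ≤ Int.negSucc n := by
  simp [Int.negSucc_eq]; omega

theorem negSucc_neg_sub_one_toNat (n : ℕ) : (-(Int.negSucc n) - 1).toNat = n := by
  simp [Int.negSucc_eq]

theorem band_eq (a b : Int) : PySem.Int.band a b = Int.land a b := by
  cases a with
  | ofNat m =>
    cases b with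
    | ofNat n => simp [PySem.Int.band, Int.land]
    | negSucc n =>
      have h1 := negSucc_not_nonneg n
      have h2 := negSucc_neg_sub_one_toNat n
      simp [PySem.Int.band, Int.land, h1, h2, nat_sub_land]
  | negSucc m =>
    have h1 := negSucc_not_nonneg m
    have h2 := negSucc_neg_sub_one_toNat m
    cases b with
    | ofNat n => simp [PySem.Int.band, Int.land, h1, h2, nat_sub_land]
    | negSucc n =>
      have h3 := negSucc_not_nonneg n
      have h4 := negSucc_neg_sub_one_toNat n
      simp [PySem.Int.band, Int.land, h1, h2, h3, h4, Int.negSucc_eq]; omega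

theorem bor_eq (a b : Int) : PySem.Int.bor a b = Int.lor a b := by
  cases a with
  | ofNat m =>
    cases b with
    | ofNat n => simp [PySem.Int.bor, Int.lor]
    | negSucc n =>
      have h1 := negSucc_not_nonneg n
      have h2 := negSucc_neg_sub_one_toNat n
      simp [PySem.Int.bor, Int.lor, h1, h2, nat_sub_land, Int.negSucc_eq]; omega
  | negSucc m =>
    have h1 := negSucc_not_nonneg m
    have h2 := negSucc_neg_sub_one_toNat m
    cases b with
    | ofNat n => simp [PySem.Int.bor, Int.lor, h1, h2, nat_sub_land, Int.negSucc_eq]; omega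
    | negSucc n =>
      have h3 := negSucc_not_nonneg n
      have h4 := negSucc_neg_sub_one_toNat n
      simp [PySem.Int.bor, Int.lor, h1, h2, h3, h4, Int.negSucc_eq]; omega

theorem bxor_eq (a b : Int) : PySem.Int.bxor a b = Int.xor a b := by
  cases a with
  | ofNat m =>
    cases b with
    | ofNat n => simp [PySem.Int.bxor, Int.xor]
    | negSucc n =>
      have h1 := negSucc_not_nonneg n
      have h2 := negSucc_neg_sub_one_toNat n
      simp [PySem.Int.bxor, Int.xor, h1, h2, Int.negSucc_eq]; omega
  | negSucc m =>
    have h1 := negSucc_not_nonneg m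
    have h2 := negSucc_neg_sub_one_toNat m
    cases b with
    | ofNat n => simp [PySem.Int.bxor, Int.xor, h1, h2, Int.negSucc_eq]; omega
    | negSucc n =>
      have h3 := negSucc_not_nonneg n
      have h4 := negSucc_neg_sub_one_toNat n
      simp [PySem.Int.bxor, Int.xor, h1, h2, h3, h4, Int.negSucc_eq]
      simp [show ¬((m : Int) ≤ -1) from by omega, show ¬((n : Int) ≤ -1) from by omega]

theorem tb_band (a b : Int) (k : ℕ) : (PySem.Int.band a b).testBit k = (a.testBit k && b.testBit k) := by
  rw [band_eq]; exact Int.testBit_land a b k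

theorem tb_bor (a b : Int) (k : ℕ) : (PySem.Int.bor a b).testBit k = (a.testBit k || b.testBit k) := by
  rw [bor_eq]; exact Int.testBit_lor a b k

theorem tb_bxor (a b : Int) (k : ℕ) : (PySem.Int.bxor a b).testBit k = xor (a.testBit k) (b.testBit k) := by
  rw [bxor_eq]; exact Int.testBit_lxor a b k

theorem tb_zero (k : ℕ) : (0 : Int).testBit k = false := by
  show (Int.ofNat 0).testBit k = false
  simp [Int.testBit]

theorem int_testBit_ext {x y : Int} (h : ∀ k, x.testBit k = y.testBit k) : x = y := by
  cases x with
  | ofNat m =>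
    cases y with
    | ofNat n =>
      have : m = n := Nat.eq_of_testBit_eq (fun i => h i)
      simp [this]
    | negSucc n =>
      exfalso
      have hm : m < 2 ^ (m + n) := lt_of_le_of_lt (Nat.le_add_right m n) Nat.lt_two_pow_self
      have hn : n < 2 ^ (m + n) := lt_of_le_of_lt (Nat.le_add_left n m) Nat.lt_two_pow_self
      have := h (m + n)
      simp [Int.testBit, Nat.testBit_lt_two_pow hm, Nat.testBit_lt_two_pow hn] at this
  | negSucc m =>
    cases y with
    | ofNat n =>
      exfalso
      have hm : m < 2 ^ (m + n) := lt_of_le_of_lt (Nat.le_add_right m n) Nat.lt_two_pow_self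
      have hn : n < 2 ^ (m + n) := lt_of_le_of_lt (Nat.le_add_left n m) Nat.lt_two_pow_self
      have := h (m + n)
      simp [Int.testBit, Nat.testBit_lt_two_pow hm, Nat.testBit_lt_two_pow hn] at this
    | negSucc n =>
      have : m = n := Nat.eq_of_testBit_eq (fun i => by
        have := h i; simpa [Int.testBit] using this)
      simp [this]

-- per-position abstraction: the natural number a slice vector encodes at bit position p
def sliceVal (p : ℕ) (V : List Int) : ℕ :=
  V.foldr (fun a acc => (a.testBit p).toNat + 2 * acc) 0

theorem sliceVal_nil (p : ℕ) : sliceVal p [] = 0 := rfl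

theorem sliceVal_cons (p : ℕ) (a : Int) (V : List Int) :
    sliceVal p (a :: V) = (a.testBit p).toNat + 2 * sliceVal p V := rfl

theorem sliceVal_lt (p : ℕ) (V : List Int) : sliceVal p V < 2 ^ V.length := by
  induction V with
  | nil => simp [sliceVal_nil]
  | cons a V ih =>
    rw [sliceVal_cons]
    have : (a.testBit p).toNat ≤ 1 := Bool.toNat_le (a.testBit p)
    simp only [List.length_cons, pow_succ]
    omega

theorem sliceVal_replicate (p w : ℕ) : sliceVal p (List.replicate w 0) = 0 := by
  induction w with
  | zero => rfl
  | succ n ih => rw [List.replicate_succ, sliceVal_cons, ih, tb_zero]; rfl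

theorem mod_double {e s M : ℕ} (he : e < 2) (hM : 0 < M) :
    (e + 2 * s) % (2 * M) = e + 2 * (s % M) := by
  have h1 : 2 * s % (2 * M) = 2 * (s % M) := Nat.mul_mod_mul_left 2 s M
  have h2 : s % M < M := Nat.mod_lt _ hM
  rw [Nat.add_mod, h1, Nat.mod_eq_of_lt (show e < 2 * M by omega),
    Nat.mod_eq_of_lt (show e + 2 * (s % M) < 2 * M by omega)]

theorem half_adder (x y : Bool) :
    x.toNat + y.toNat = (xor x y).toNat + 2 * (x && y).toNat := by
  cases x <;> cases y <;> rfl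

theorem full_adder (x y z : Bool) :
    x.toNat + y.toNat + z.toNat
      = (xor (xor x y) z).toNat + 2 * ((x && y) || (z && xor x y)).toNat := by
  cases x <;> cases y <;> cases z <;> rfl

-- A's inner loop adds the carry bit into the per-position counter, mod 2^bits
theorem pyAddBit_length (V : List Int) (c : Int) : (pyAddBit V c).length = V.length := by
  induction V generalizing c with
  | nil => rfl
  | cons s rest ih =>
    simp only [pyAddBit]
    split <;> simp [ih]

theorem pyAddBit_val (p : ℕ) (V : List Int) (c : Int) :
    sliceVal p (pyAddBit V c) = (sliceVal p V + (c.testBit p).toNat) % 2 ^ V.length := by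
  induction V generalizing c with
  | nil => simp [pyAddBit, sliceVal_nil, Nat.mod_one]
  | cons s rest ih =>
    simp only [pyAddBit]
    split
    · next hc =>
      have hbit : (s.testBit p && c.testBit p) = false := by
        have := tb_band s c p
        rw [hc, tb_zero] at this
        exact this.symm
      rw [sliceVal_cons, tb_bxor, sliceVal_cons]
      have hR := sliceVal_lt p rest
      have h1 : (xor (s.testBit p) (c.testBit p)).toNat
          = (s.testBit p).toNat + (c.testBit p).toNat := by
        cases hs : s.testBit p <;> cases hcp : c.testBit p <;>
          simp_all
      rw [h1, List.length_cons, pow_succ]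
      have hsum : (s.testBit p).toNat + (c.testBit p).toNat ≤ 1 := by
        cases hs : s.testBit p <;> cases hcp : c.testBit p <;> simp_all
      rw [Nat.mod_eq_of_lt (by omega)]
      omega
    · next hc =>
      rw [sliceVal_cons, tb_bxor, ih, tb_band, sliceVal_cons, List.length_cons]
      have hR := sliceVal_lt p rest
      have h2 : 2 ^ (rest.length + 1) = 2 * 2 ^ rest.length := by ring
      rw [h2]
      have := half_adder (s.testBit p) (c.testBit p)
      have he : (xor (s.testBit p) (c.testBit p)).toNat < 2 := by
        have := Bool.toNat_le (xor (s.testBit p) (c.testBit p)); omega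
      have hM : 0 < 2 ^ rest.length := Nat.two_pow_pos _
      rw [show (s.testBit p).toNat + 2 * sliceVal p rest + (c.testBit p).toNat
            = (xor (s.testBit p) (c.testBit p)).toNat
              + 2 * (sliceVal p rest + (s.testBit p && c.testBit p).toNat) from by omega]
      rw [mod_double he hM]

-- B's ripple-carry loop adds two counters, mod 2^t
theorem sliceVal_headD_tail (p : ℕ) (X : List Int) :
    sliceVal p X = ((X.headD 0).testBit p).toNat + 2 * sliceVal p X.tail := by
  cases X with
  | nil => simp [sliceVal_nil, tb_zero]
  | cons a as => rfl

theorem rippleAddT_length (t : ℕ) (X Y : List Int) (c : Int) :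
    (rippleAddT t X Y c).length = t := by
  induction t generalizing X Y c with
  | zero => rfl
  | succ t ih => simp [rippleAddT, ih]

theorem rippleAddT_val (p t : ℕ) (X Y : List Int) (c : Int) :
    sliceVal p (rippleAddT t X Y c)
      = (sliceVal p X + sliceVal p Y + (c.testBit p).toNat) % 2 ^ t := by
  induction t generalizing X Y c with
  | zero => simp [rippleAddT, sliceVal_nil, Nat.mod_one]
  | succ t ih =>
    simp only [rippleAddT]
    rw [sliceVal_cons, tb_bxor, tb_bxor, ih]
    rw [sliceVal_headD_tail p X, sliceVal_headD_tail p Y]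
    have hfa := full_adder ((X.headD 0).testBit p) ((Y.headD 0).testBit p) (c.testBit p)
    have he : (xor (xor ((X.headD 0).testBit p) ((Y.headD 0).testBit p)) (c.testBit p)).toNat < 2 := by
      have := Bool.toNat_le (xor (xor ((X.headD 0).testBit p) ((Y.headD 0).testBit p)) (c.testBit p))
      omega
    have hM : 0 < 2 ^ t := Nat.two_pow_pos _
    have hcarry : ((PySem.Int.bor (PySem.Int.band (X.headD 0) (Y.headD 0))
          (PySem.Int.band c (PySem.Int.bxor (X.headD 0) (Y.headD 0)))).testBit p).toNat
        = (((X.headD 0).testBit p && (Y.headD 0).testBit p)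
            || (c.testBit p && xor ((X.headD 0).testBit p) ((Y.headD 0).testBit p))).toNat := by
      rw [tb_bor, tb_band, tb_band, tb_bxor]
    rw [hcarry]
    have h2 : 2 ^ (t + 1) = 2 * 2 ^ t := by ring
    rw [h2]
    rw [show ((X.headD 0).testBit p).toNat + 2 * sliceVal p X.tail
          + (((Y.headD 0).testBit p).toNat + 2 * sliceVal p Y.tail) + (c.testBit p).toNat
        = (xor (xor ((X.headD 0).testBit p) ((Y.headD 0).testBit p)) (c.testBit p)).toNat
          + 2 * (sliceVal p X.tail + sliceVal p Y.tail
            + (((X.headD 0).testBit p && (Y.headD 0).testBit p)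
              || (c.testBit p && xor ((X.headD 0).testBit p) ((Y.headD 0).testBit p))).toNat)
        from by omega]
    rw [mod_double he hM]

-- per-position count of set input bits
def bitCnt (p : ℕ) (l : List Int) : ℕ := l.countP (fun S => S.testBit p)

theorem bitCnt_cons (p : ℕ) (S : Int) (l : List Int) :
    bitCnt p (S :: l) = (S.testBit p).toNat + bitCnt p l := by
  simp [bitCnt, List.countP_cons]
  cases h : S.testBit p <;> simp [h] <;> omega

theorem bitCnt_append (p : ℕ) (l₁ l₂ : List Int) :
    bitCnt p (l₁ ++ l₂) = bitCnt p l₁ + bitCnt p l₂ := by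
  simp [bitCnt, List.countP_append]

theorem bitCnt_le_length (p : ℕ) (l : List Int) : bitCnt p l ≤ l.length :=
  List.countP_le_length

theorem foldl_length (l : List Int) (V : List Int) :
    (l.foldl (fun slices S => pyAddBit slices S) V).length = V.length := by
  induction l generalizing V with
  | nil => rfl
  | cons S l ih => simp only [List.foldl_cons]; rw [ih, pyAddBit_length]

theorem foldl_val (p : ℕ) (l : List Int) (V : List Int) :
    sliceVal p (l.foldl (fun slices S => pyAddBit slices S) V)
      = (sliceVal p V + bitCnt p l) % 2 ^ V.length := by
  induction l generalizing V with
  | nil =>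
    simp only [List.foldl_nil, bitCnt, List.countP_nil, Nat.add_zero]
    exact (Nat.mod_eq_of_lt (sliceVal_lt p V)).symm
  | cons S l ih =>
    simp only [List.foldl_cons]
    rw [ih, pyAddBit_val, pyAddBit_length, Nat.mod_add_mod, bitCnt_cons]
    ring_nf

-- the (hi - lo).bit_length() bound: a count over m inputs fits in bitLength m slices
theorem nat_lt_two_pow_bitLength (m : ℕ) : m < 2 ^ PySem.Int.bitLength (m : Int) := by
  have := PySem.Int.lt_two_pow_bitLength (m : Int)
  simpa using this

theorem bitLength_mono {m n : ℕ} (h : m ≤ n) :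
    PySem.Int.bitLength (m : Int) ≤ PySem.Int.bitLength (n : Int) := by
  by_contra hlt
  push_neg at hlt
  rcases Nat.eq_zero_or_pos m with hm | hm
  · subst hm
    have h0 : PySem.Int.bitLength ((0 : ℕ) : Int) = 0 := by decide
    omega
  · have hmne : (m : Int) ≠ 0 := by
      simp
      omega
    have hlow : 2 ^ (PySem.Int.bitLength (m : Int) - 1) ≤ m := by
      have := PySem.Int.two_pow_bitLength_le (m : Int) hmne
      simpa using this
    have hup : n < 2 ^ PySem.Int.bitLength (n : Int) := nat_lt_two_pow_bitLength n
    have hpow : 2 ^ PySem.Int.bitLength (n : Int) ≤ 2 ^ (PySem.Int.bitLength (m : Int) - 1) :=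
      Nat.pow_le_pow_right (by norm_num) (by omega)
    omega

theorem dncSum_length (l : List Int) (w : ℕ) :
    (dncSum l w).length = min w (PySem.Int.bitLength (l.length : Int)) := by
  induction l, w using dncSum.induct with
  | case1 w =>
    have : PySem.Int.bitLength ((0 : ℕ) : Int) = 0 := by decide
    simp [dncSum, this]
  | case2 S =>
    simp [dncSum]
  | case3 S m =>
    have hbl : PySem.Int.bitLength (1 : Int) = 1 := by decide
    simp [dncSum]
    rw [hbl]
    omega
  | case4 x y rest w _l _k ih1 ih2 =>
    rw [dncSum, rippleAddT_length]

theorem dncSum_val (p : ℕ) (l : List Int) (w : ℕ) :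
    sliceVal p (dncSum l w)
      = bitCnt p l % 2 ^ (min w (PySem.Int.bitLength (l.length : Int))) := by
  induction l, w using dncSum.induct with
  | case1 w => simp [dncSum, sliceVal_nil, bitCnt]
  | case2 S => simp [dncSum, sliceVal_nil, Nat.mod_one]
  | case3 S m =>
    have hbl : PySem.Int.bitLength ((1 : ℕ) : Int) = 1 := by decide
    rw [dncSum]
    have h1 : bitCnt p [S] = (S.testBit p).toNat := by
      rw [bitCnt_cons]; simp [bitCnt]
    have h2 : (S.testBit p).toNat ≤ 1 := Bool.toNat_le _
    simp only [List.length_cons, List.length_nil, Nat.zero_add, hbl]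
    rw [sliceVal_cons, sliceVal_nil, h1]
    have hmin : min (m + 1) 1 = 1 := by omega
    rw [hmin, Nat.mod_eq_of_lt (by omega)]
    omega
  | case4 x y rest w _l _k ih1 ih2 =>
    rw [dncSum, rippleAddT_val, ih1, ih2, tb_zero]
    simp only [Bool.toNat_false, Nat.add_zero]
    -- each half's truncated counter is congruent to its true count mod the merged width
    have hhalf : ∀ (h : List Int), h.length ≤ (x :: y :: rest).length →
        (bitCnt p h % 2 ^ (min w (PySem.Int.bitLength (h.length : Int)))) % 2 ^ (min w (PySem.Int.bitLength ((x :: y :: rest).length : Int)))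
          = bitCnt p h % 2 ^ (min w (PySem.Int.bitLength ((x :: y :: rest).length : Int))) := by
      intro h hlen
      set t := min w (PySem.Int.bitLength ((x :: y :: rest).length : Int)) with ht
      by_cases hc : PySem.Int.bitLength (h.length : Int) ≤ w
      · -- the half is stored exactly: its count is below 2 ^ bitLength
        have hfit : bitCnt p h < 2 ^ (min w (PySem.Int.bitLength (h.length : Int))) := by
          rw [Nat.min_eq_right hc]
          exact lt_of_le_of_lt (bitCnt_le_length p h) (nat_lt_two_pow_bitLength _)
        rw [Nat.mod_eq_of_lt hfit]
      · -- both widths are clamped to w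
        push_neg at hc
        have hm : PySem.Int.bitLength (h.length : Int) ≤ PySem.Int.bitLength ((x :: y :: rest).length : Int) :=
          bitLength_mono hlen
        have e1 : min w (PySem.Int.bitLength (h.length : Int)) = w := by omega
        have e2 : t = w := by rw [ht]; omega
        rw [e1, e2]
        exact Nat.mod_mod_of_dvd _ dvd_rfl
    have hL := hhalf ((x :: y :: rest).take ((x :: y :: rest).length / 2)) (by simp [List.length_take])
    have hR := hhalf ((x :: y :: rest).drop ((x :: y :: rest).length / 2)) (by simp)
    rw [Nat.add_mod, hL, hR, ← Nat.add_mod]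
    rw [show bitCnt p ((x :: y :: rest).take ((x :: y :: rest).length / 2))
          + bitCnt p ((x :: y :: rest).drop ((x :: y :: rest).length / 2))
        = bitCnt p (x :: y :: rest) from by rw [← bitCnt_append, List.take_append_drop]]

theorem sliceVal_append (p : ℕ) (X Y : List Int) :
    sliceVal p (X ++ Y) = sliceVal p X + 2 ^ X.length * sliceVal p Y := by
  induction X with
  | nil => simp [sliceVal_nil]
  | cons a as ih =>
    simp only [List.cons_append, sliceVal_cons, ih, List.length_cons]
    ring

theorem sliceVal_inj : ∀ (V W : List Int), V.length = W.length →
    (∀ p, sliceVal p V = sliceVal p W) → V = W := by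
  intro V
  induction V with
  | nil =>
    intro W h _
    cases W with
    | nil => rfl
    | cons b bs => simp at h
  | cons a as ih =>
    intro W h hv
    cases W with
    | nil => simp at h
    | cons b bs =>
      simp only [List.length_cons] at h
      have hbit : ∀ p, a.testBit p = b.testBit p := by
        intro p
        have := hv p
        rw [sliceVal_cons, sliceVal_cons] at this
        cases ha : a.testBit p <;> cases hb : b.testBit p <;> simp_all <;> omega
      have htail : ∀ p, sliceVal p as = sliceVal p bs := by
        intro p
        have := hv p
        rw [sliceVal_cons, sliceVal_cons, hbit p] at this
        omega
      rw [int_testBit_ext hbit, ih bs (by omega) htail]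

-- ===== VERDICT (by name: the statement is the Claim_ definition above) =====
theorem sum_bitsets_py_spec : Claim_equal_sum_bitsets_py := by
  intro bitsets bits _
  unfold Spec_sum_bitsets_py sum_bitsets_py sum_bitsets_py_alt
  simp only []
  apply sliceVal_inj
  · rw [foldl_length, List.length_replicate, List.length_append, List.length_replicate]
    by_cases h : bitsets = []
    · simp [h]
    · rw [if_neg h, dncSum_length]; omega
  · intro p
    rw [foldl_val, sliceVal_replicate, List.length_replicate, Nat.zero_add,
      sliceVal_append, sliceVal_replicate, Nat.mul_zero, Nat.add_zero]
    by_cases h : bitsets = []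
    · simp [h, sliceVal_nil, bitCnt]
    · rw [if_neg h, dncSum_val]
      by_cases hc : PySem.Int.bitLength ((bitsets.length : ℕ) : Int) ≤ bits.toNat
      · have hfit : bitCnt p bitsets < 2 ^ (min bits.toNat (PySem.Int.bitLength (bitsets.length : Int))) := by
          rw [Nat.min_eq_right hc]
          exact lt_of_le_of_lt (bitCnt_le_length p bitsets) (nat_lt_two_pow_bitLength _)
        rw [Nat.mod_eq_of_lt hfit, Nat.mod_eq_of_lt
          (lt_of_lt_of_le hfit (Nat.pow_le_pow_right (by norm_num) (by omega)))]
      · push_neg at hc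
        rw [Nat.min_eq_left (by omega)]
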